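-- pv_equiv track=rewrite | github.com/NVIDIA/TransformerEngine | tests/jax/test_custom_call_shape.py | _joint_named_shape
-- ===== SOURCE A (Python) =====
-- def _joint_named_shape(ns1, ns2):
--     output_named_shape = {**ns1}
--     need_assert = False
--     for key in ns2:
--         if key in output_named_shape and output_named_shape[key] != ns2[key]:
--             need_assert = True
--         else:
--             output_named_shape[key] = ns2[key]
--     return output_named_shape, need_assert
-- ===== SOURCE B (Python) =====
-- def _joint_named_shape(ns1, ns2):
--     output = {k: ns1[k] if k in ns1 else ns2[k] for k in (*ns1, *ns2)}
--     need_assert = len(ns1.items() & ns2.items()) < len(ns1.keys() & ns2.keys())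
--     return output, need_assert
-- ===== Notes on version B (the rewrite author's own statement) =====
-- stated objective: simpler
-- what changed: A's single stateful loop that interleaves conflict-flagging with conditional insertion is replaced by a one-expression dict comprehension over the concatenated key sequence with first-dict-priority lookup, and the conflict flag is computed by set-cardinality arithmetic (len(items1 & items2) < len(keys1 & keys2)) instead of any key scan.
import Mathlib
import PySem

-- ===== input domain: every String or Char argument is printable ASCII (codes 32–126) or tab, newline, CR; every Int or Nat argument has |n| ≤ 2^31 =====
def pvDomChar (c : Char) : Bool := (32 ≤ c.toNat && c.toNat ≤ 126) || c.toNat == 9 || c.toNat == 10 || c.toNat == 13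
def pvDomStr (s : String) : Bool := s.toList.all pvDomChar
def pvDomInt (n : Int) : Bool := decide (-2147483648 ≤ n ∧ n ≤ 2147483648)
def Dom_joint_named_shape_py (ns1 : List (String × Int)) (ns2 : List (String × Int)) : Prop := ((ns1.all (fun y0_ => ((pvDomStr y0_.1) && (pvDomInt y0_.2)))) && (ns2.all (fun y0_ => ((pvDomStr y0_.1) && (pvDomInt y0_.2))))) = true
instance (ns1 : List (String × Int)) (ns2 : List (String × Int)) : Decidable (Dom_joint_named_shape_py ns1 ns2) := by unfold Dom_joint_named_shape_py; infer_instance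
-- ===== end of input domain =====

-- B replaces A's stateful merge-and-flag loop by a one-expression dict comprehension over the
-- concatenated key sequence plus a set-cardinality conflict test (objective: simpler).
-- Return-value equivalence only; neither program mutates its inputs.

-- ===== PORT A =====
-- literal transliteration: output = {**ns1}; for key in ns2: flag conflict or insert.
def joint_named_shape_py (ns1 : List (String × Int)) (ns2 : List (String × Int)) : (List (String × Int)) × Bool :=
  let output := PySem.Dict.ofList ns1
  let d2 := PySem.Dict.ofList ns2
  let st := d2.keys.foldl
    (fun (st : PySem.Dict String Int × Bool) key =>
      if st.1.contains key && st.1.getD key 0 != d2.getD key 0 then (st.1, true)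
      else (st.1.insert key (d2.getD key 0), st.2))
    (output, false)
  (st.1.items, st.2)

-- ===== PORT B =====
-- {k: ns1[k] if k in ns1 else ns2[k] for k in (*ns1, *ns2)} and
-- len(ns1.items() & ns2.items()) < len(ns1.keys() & ns2.keys()).
-- The view intersections are ported as filters over ns2's items/keys: exact, since a dict's
-- items and keys are duplicate-free, so the filtered list has exactly the intersection's elements.
def joint_named_shape_py_alt (ns1 : List (String × Int)) (ns2 : List (String × Int)) : (List (String × Int)) × Bool :=
  let d1 := PySem.Dict.ofList ns1
  let d2 := PySem.Dict.ofList ns2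
  let output := (d1.keys ++ d2.keys).foldl
    (fun d k => d.insert k (if d1.contains k then d1.getD k 0 else d2.getD k 0))
    PySem.Dict.empty
  let need_assert :=
    decide ((d2.items.filter (fun p => decide (p ∈ d1.items))).length
      < (d2.keys.filter (fun k => decide (k ∈ d1.keys))).length)
  (output.items, need_assert)

-- ===== PRECONDITION & SPEC =====
def Spec_joint_named_shape_py (ns1 : List (String × Int)) (ns2 : List (String × Int)) (out : (List (String × Int)) × Bool) : Prop := out = joint_named_shape_py_alt ns1 ns2
instance (ns1 : List (String × Int)) (ns2 : List (String × Int)) (out : (List (String × Int)) × Bool) : Decidable (Spec_joint_named_shape_py ns1 ns2 out) := by unfold Spec_joint_named_shape_py; infer_instance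

-- ===== CLAIM (what is proved, stated in full; the proofs are below) =====
def Claim_equal_joint_named_shape_py : Prop := ∀ (ns1 : List (String × Int)) (ns2 : List (String × Int)), Dom_joint_named_shape_py ns1 ns2 → Spec_joint_named_shape_py ns1 ns2 (joint_named_shape_py ns1 ns2)

-- ===== LEMMAS AND PROOFS =====

-- Re-inserting the value already stored at a key leaves the dict unchanged.
theorem dict_insert_get_self (d : PySem.Dict String Int)
    (k : String) (v : Int) (hnd : d.keys.Nodup) (h : d.get? k = some v) : d.insert k v = d := by
  apply PySem.Dict.ext
  have hc : d.contains k = true := by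
    rw [PySem.Dict.contains_eq_isSome_get?, h]; rfl
  rw [PySem.Dict.items_insert]
  simp only [hc, if_true]
  have hid : ∀ p ∈ d.items, (if p.1 == k then (k, v) else p) = p := by
    rintro ⟨pk, pv⟩ hp
    by_cases hpk : pk = k
    · subst hpk
      have hget : d.get? pk = some pv := PySem.Dict.get?_of_mem_items _ hp hnd
      rw [h] at hget
      simp at hget
      simp [hget]
    · simp [hpk]
  rw [List.map_congr_left hid, List.map_id']

-- A's loop over l, started from (d, na), splits into the merged dict and the conflict flag.
theorem loopA_eq (l : List (String × Int)) (d : PySem.Dict String Int) (na : Bool)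
    (hnd : d.keys.Nodup) (hl : (l.map Prod.fst).Nodup) :
    l.foldl
      (fun (st : PySem.Dict String Int × Bool) p =>
        if st.1.contains p.1 && st.1.getD p.1 0 != p.2 then (st.1, true)
        else (st.1.insert p.1 p.2, st.2))
      (d, na)
    = ((l.filter (fun p => !(d.contains p.1))).foldl (fun d p => d.insert p.1 p.2) d,
       na || l.any (fun p => d.contains p.1 && d.getD p.1 0 != p.2)) := by
  induction l generalizing d na with
  | nil => simp
  | cons p t ih =>
    simp only [List.map_cons, List.nodup_cons] at hl
    obtain ⟨hp, ht⟩ := hl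
    by_cases hc : d.contains p.1 = true
    · by_cases hv : d.getD p.1 0 = p.2
      · have hins : d.insert p.1 p.2 = d := by
          apply dict_insert_get_self d p.1 p.2 hnd
          rw [PySem.Dict.getD_eq_get?_getD] at hv
          cases hg : d.get? p.1 with
          | none => rw [PySem.Dict.contains_eq_isSome_get?, hg] at hc; simp at hc
          | some w => rw [hg] at hv; simp at hv; simp [hv]
        simp only [List.foldl_cons, List.filter_cons, List.any_cons, hc, hv, bne_self_eq_false,
          Bool.and_false, Bool.false_or, Bool.not_true, hins]
        simpa using ih d na hnd ht
      · have hbne : (d.getD p.1 0 != p.2) = true := by simp [bne, hv]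
        simp only [List.foldl_cons, List.filter_cons, List.any_cons, hc, hbne, Bool.and_self,
          if_true, Bool.not_true]
        rw [ih d true hnd ht]
        simp
    · have hc' : d.contains p.1 = false := by simpa using hc
      simp only [List.foldl_cons, List.filter_cons, List.any_cons, hc', Bool.false_and,
        Bool.not_false, if_true, Bool.false_or]
      rw [if_neg Bool.false_ne_true]
      rw [ih (d.insert p.1 p.2) na (PySem.Dict.nodup_keys_insert _ _ _ hnd) ht]
      have hcong : ∀ q ∈ t, ((d.insert p.1 p.2).contains q.1 = d.contains q.1) := by
        intro q hq
        have : q.1 ≠ p.1 := fun h => hp (h ▸ List.mem_map_of_mem hq)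
        rw [PySem.Dict.contains_insert]
        simp [this]
      have hfilter : t.filter (fun q => !((d.insert p.1 p.2).contains q.1))
          = t.filter (fun q => !(d.contains q.1)) := by
        apply List.filter_congr; intro q hq; rw [hcong q hq]
      have hany : t.any (fun q => (d.insert p.1 p.2).contains q.1 && (d.insert p.1 p.2).getD q.1 0 != q.2)
          = t.any (fun q => d.contains q.1 && d.getD q.1 0 != q.2) := by
        apply Bool.eq_iff_iff.mpr
        simp only [List.any_eq_true]
        constructor
        · rintro ⟨q, hq, hcnd⟩
          have hne : q.1 ≠ p.1 := fun h => hp (h ▸ List.mem_map_of_mem hq)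
          refine ⟨q, hq, ?_⟩
          rwa [hcong q hq, PySem.Dict.getD_insert, if_neg hne] at hcnd
        · rintro ⟨q, hq, hcnd⟩
          have hne : q.1 ≠ p.1 := fun h => hp (h ▸ List.mem_map_of_mem hq)
          refine ⟨q, hq, ?_⟩
          rwa [hcong q hq, PySem.Dict.getD_insert, if_neg hne]
      rw [hfilter, hany]

-- B's comprehension fold over a key list, against a fixed d1/d2: on already-present keys it
-- re-inserts the stored value (no-op); on fresh keys it behaves like A's filtered insert fold.
theorem loopB_eq (d1 d2 : PySem.Dict String Int) (l : List String) (acc : PySem.Dict String Int)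
    (hnd : acc.keys.Nodup) (h1 : ∀ k, d1.contains k = true → acc.get? k = d1.get? k) :
    l.foldl (fun d k => d.insert k (if d1.contains k then d1.getD k 0 else d2.getD k 0)) acc
    = ((l.map (fun k => (k, d2.getD k 0))).filter (fun p => !(d1.contains p.1))).foldl
        (fun d p => d.insert p.1 p.2) acc := by
  induction l generalizing acc with
  | nil => rfl
  | cons k t ih =>
    by_cases hc : d1.contains k = true
    · have hacc : acc.insert k (d1.getD k 0) = acc := by
        apply dict_insert_get_self acc k (d1.getD k 0) hnd
        rw [h1 k hc]
        cases hg : d1.get? k with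
        | none => rw [PySem.Dict.contains_eq_isSome_get?, hg] at hc; simp at hc
        | some w => rw [PySem.Dict.getD_eq_get?_getD, hg]; simp
      simp only [List.foldl_cons, List.map_cons, List.filter_cons, hc, if_true, Bool.not_true,
        hacc]
      rw [if_neg Bool.false_ne_true]
      exact ih acc hnd h1
    · have hc' : d1.contains k = false := by simpa using hc
      simp only [List.foldl_cons, List.map_cons, List.filter_cons, hc',
        Bool.not_false, if_true]
      apply ih
      · exact PySem.Dict.nodup_keys_insert _ _ _ hnd
      · intro k' hk'
        have hne : k' ≠ k := fun h => by rw [h] at hk'; rw [hk'] at hc'; cases hc'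
        rw [PySem.Dict.get?_insert_of_ne _ _ hne]
        exact h1 k' hk'

-- Counting: with a pointwise implication p → q, the counts differ exactly when some element
-- satisfies q but not p.
theorem countP_lt_iff {α : Type} (l : List α) (p q : α → Bool)
    (him : ∀ x ∈ l, p x = true → q x = true) :
    (l.countP p < l.countP q ↔ ∃ x ∈ l, q x = true ∧ ¬ p x = true) := by
  induction l with
  | nil => simp
  | cons a t ih =>
    have hle : t.countP p ≤ t.countP q :=
      List.countP_mono_left (fun x hx => him x (List.mem_cons_of_mem a hx))
    have iht := ih (fun x hx => him x (List.mem_cons_of_mem a hx))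
    by_cases hpa : p a = true
    · have hqa : q a = true := him a List.mem_cons_self hpa
      simp only [List.countP_cons, hpa, hqa, if_true]
      constructor
      · intro h
        obtain ⟨x, hx, hq, hp⟩ := iht.mp (by omega)
        exact ⟨x, List.mem_cons_of_mem a hx, hq, hp⟩
      · rintro ⟨x, hx, hq, hp⟩
        rcases List.mem_cons.mp hx with rfl | hx
        · exact absurd hpa hp
        · have := iht.mpr ⟨x, hx, hq, hp⟩; omega
    · have hpa' : p a = false := Bool.not_eq_true _ ▸ Bool.eq_false_iff.mpr hpa
      by_cases hqa : q a = true
      · simp only [List.countP_cons, hpa', hqa, if_true, Bool.false_eq_true, if_false]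
        constructor
        · intro _; exact ⟨a, List.mem_cons_self, hqa, hpa⟩
        · intro _; omega
      · have hqa' : q a = false := Bool.not_eq_true _ ▸ Bool.eq_false_iff.mpr hqa
        simp only [List.countP_cons, hpa', hqa', Bool.false_eq_true, if_false]
        constructor
        · intro h
          obtain ⟨x, hx, hq, hp⟩ := iht.mp (by omega)
          exact ⟨x, List.mem_cons_of_mem a hx, hq, hp⟩
        · rintro ⟨x, hx, hq, hp⟩
          rcases List.mem_cons.mp hx with rfl | hx
          · exact absurd hq hqa
          · exact iht.mpr ⟨x, hx, hq, hp⟩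

-- B's cardinality test equals A's conflict scan.
theorem flag_eq (d1 d2 : PySem.Dict String Int) (hnd1 : d1.keys.Nodup) :
    (decide ((d2.items.filter (fun p => decide (p ∈ d1.items))).length
        < (d2.keys.filter (fun k => decide (k ∈ d1.keys))).length))
    = d2.items.any (fun p => d1.contains p.1 && d1.getD p.1 0 != p.2) := by
  have hkeys : d2.keys.filter (fun k => decide (k ∈ d1.keys))
      = (d2.items.filter (fun p => decide (p.1 ∈ d1.keys))).map Prod.fst := by
    show (d2.items.map Prod.fst).filter _ = _
    rw [List.filter_map]
    rfl
  rw [hkeys, List.length_map, ← List.countP_eq_length_filter, ← List.countP_eq_length_filter]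
  have him : ∀ p ∈ d2.items, decide (p ∈ d1.items) = true → decide (p.1 ∈ d1.keys) = true := by
    intro p _ h
    simp only [decide_eq_true_eq] at *
    exact PySem.Dict.mem_keys_of_mem_items _ h
  apply Bool.eq_iff_iff.mpr
  rw [decide_eq_true_iff, countP_lt_iff _ _ _ him, List.any_eq_true]
  constructor
  · rintro ⟨p, hp, hq, hnp⟩
    simp only [decide_eq_true_eq] at hq hnp
    have hc : d1.contains p.1 = true := (PySem.Dict.contains_iff_mem_keys _ _).mpr hq
    refine ⟨p, hp, ?_⟩
    rw [hc, Bool.true_and, bne_iff_ne]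
    intro hv
    apply hnp
    apply (PySem.Dict.get?_eq_some_iff_mem_items _ _ _ hnd1).mp
    rw [PySem.Dict.contains_eq_isSome_get?] at hc
    cases hg : d1.get? p.1 with
    | none => rw [hg] at hc; simp at hc
    | some w =>
      rw [PySem.Dict.getD_eq_get?_getD, hg] at hv
      simp only [Option.getD_some] at hv
      rw [hv]
  · rintro ⟨p, hp, hcnd⟩
    rw [Bool.and_eq_true, bne_iff_ne] at hcnd
    obtain ⟨hc, hv⟩ := hcnd
    refine ⟨p, hp, ?_, ?_⟩
    · simp only [decide_eq_true_eq]
      exact (PySem.Dict.contains_iff_mem_keys _ _).mp hc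
    · simp only [decide_eq_true_eq]
      intro hmem
      exact hv (PySem.Dict.getD_of_mem_items _ hmem hnd1 0)

-- ===== VERDICT (by name: the statement is the Claim_ definition above) =====
theorem joint_named_shape_py_spec : Claim_equal_joint_named_shape_py := by
  intro ns1 ns2 _
  unfold Spec_joint_named_shape_py joint_named_shape_py joint_named_shape_py_alt
  set d1 := PySem.Dict.ofList ns1 with hd1
  set d2 := PySem.Dict.ofList ns2 with hd2
  have hnd1 : d1.keys.Nodup := PySem.Dict.nodup_keys_ofList ns1
  have hnd2 : d2.keys.Nodup := PySem.Dict.nodup_keys_ofList ns2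
  have hitems : d2.items = d2.keys.map (fun k => (k, d2.getD k 0)) :=
    PySem.Dict.items_eq_map_keys d2 hnd2 0
  have hkeys : (d2.items.map Prod.fst).Nodup := hnd2
  -- A's loop over d2.keys is the same fold over d2.items
  have hfold : d2.keys.foldl
      (fun (st : PySem.Dict String Int × Bool) key =>
        if st.1.contains key && st.1.getD key 0 != d2.getD key 0 then (st.1, true)
        else (st.1.insert key (d2.getD key 0), st.2)) (d1, false)
      = d2.items.foldl
      (fun (st : PySem.Dict String Int × Bool) p =>
        if st.1.contains p.1 && st.1.getD p.1 0 != p.2 then (st.1, true)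
        else (st.1.insert p.1 p.2, st.2)) (d1, false) := by
    rw [hitems, List.foldl_map]
  -- B's comprehension: stage 1 over d1.keys rebuilds d1, stage 2 over d2.keys is A's insert fold
  have hstage1 : d1.keys.foldl
      (fun d k => d.insert k (if d1.contains k then d1.getD k 0 else d2.getD k 0))
      PySem.Dict.empty = d1 := by
    apply PySem.Dict.ext
    rw [show (fun (d : PySem.Dict String Int) k =>
          d.insert k (if d1.contains k then d1.getD k 0 else d2.getD k 0))
        = (fun d k => d.insert ((fun (a : String) => a) k)
            ((fun a => if d1.contains a then d1.getD a 0 else d2.getD a 0) k)) from rfl]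
    rw [PySem.Dict.items_foldl_insert_fresh _ _ _ _
      (fun a _ => PySem.Dict.contains_empty a) (by simpa using hnd1)]
    rw [PySem.Dict.items_eq_map_keys d1 hnd1 0]
    simp only [show (PySem.Dict.empty : PySem.Dict String Int).items = [] from rfl,
      List.nil_append]
    apply List.map_congr_left
    intro k hk
    rw [if_pos ((PySem.Dict.contains_iff_mem_keys _ _).mpr hk)]
  have hB : (d1.keys ++ d2.keys).foldl
      (fun d k => d.insert k (if d1.contains k then d1.getD k 0 else d2.getD k 0))
      PySem.Dict.empty
      = (d2.items.filter (fun p => !(d1.contains p.1))).foldl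
          (fun d p => d.insert p.1 p.2) d1 := by
    rw [List.foldl_append, hstage1]
    rw [loopB_eq d1 d2 d2.keys d1 hnd1 (fun _ _ => rfl), ← hitems]
  simp only [hfold, loopA_eq d2.items d1 false hnd1 hkeys, hB,
    flag_eq d1 d2 hnd1, Bool.false_or]
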